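-- pv_equiv track=rewrite | github.com/money666-sxy/douban_background | bookInfo/time_json.py | time_ddict
-- ===== SOURCE A (Python) =====
-- def time_ddict(tt_list):
--     year_dict = {}  # 定义一个存放年份的字典套空字典
--     inner_dict = {}
--     for i in range(1, 13):
--         inner_dict[str(i).zfill(2)] = int(0)   # 定义一个内层字典
--     tf_dict = {}  # 定义一个存放月份频数的字典
--
--     for t in tt_list:  # 遍历清洗过的YYYY-MM列表
--         year_s, mon_s = t.split('-')  # 将年月分开
--         year_dict[year_s] = inner_dict  # 将年份字典存入key（年份）、value（空字典）
--         if t in tf_dict:  # 制作一个年月频数字典key（YYYY-MM）、value（频数）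
--             tf_dict[t] += 1
--         else:
--             tf_dict[t] = 1
--     year_dict = sorted(year_dict.items(),
--                        key=lambda item: item[0], reverse=False)
--     year_dict = dict(year_dict)
--
--     for tf_year_mon, tf in tf_dict.items():  # 遍历年月频数字典的key（YYYY-MM）、value（频数）
--         add_dict = {}
--         tf_year, tf_mon = tf_year_mon.split('-')    # 将年月分开
--         add_dict[str(tf_mon).zfill(2)] = int(tf)    # 制作月份对应词频键值对
--         a = year_dict.get(tf_year)                  # 创建一个对象保存年份字典中年份所对应的value
--         a = dict(a)                                 # 转化为字典格式
--         a.update(add_dict)                          # 将月份键值对添加到a上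
--         # 最后将a作为年份字典的value，以此循环更新所有月份频率
--         year_dict[tf_year] = a
--     return year_dict
-- ===== SOURCE B (Python) =====
-- def time_ddict(tt_list):
--     result = {}
--     for t in tt_list:
--         year, mon = t.split('-')
--         if year not in result:
--             result[year] = {str(i).zfill(2): 0 for i in range(1, 13)}
--         key = mon.zfill(2)
--         result[year][key] = result[year].get(key, 0) + 1
--     return dict(sorted(result.items()))
-- ===== Notes on version B (the rewrite author's own statement) =====
-- stated objective: simpler
-- what changed: Replaces A's two-phase scheme (insert shared template per year, build a separate YYYY-MM frequency counter, sort, then redistribute counts by copying and updating per-year dicts) with a single pass that initialises each year's month template on first sight and increments the zero-filled month key directly, sorting once at the end. …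
import Mathlib
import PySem

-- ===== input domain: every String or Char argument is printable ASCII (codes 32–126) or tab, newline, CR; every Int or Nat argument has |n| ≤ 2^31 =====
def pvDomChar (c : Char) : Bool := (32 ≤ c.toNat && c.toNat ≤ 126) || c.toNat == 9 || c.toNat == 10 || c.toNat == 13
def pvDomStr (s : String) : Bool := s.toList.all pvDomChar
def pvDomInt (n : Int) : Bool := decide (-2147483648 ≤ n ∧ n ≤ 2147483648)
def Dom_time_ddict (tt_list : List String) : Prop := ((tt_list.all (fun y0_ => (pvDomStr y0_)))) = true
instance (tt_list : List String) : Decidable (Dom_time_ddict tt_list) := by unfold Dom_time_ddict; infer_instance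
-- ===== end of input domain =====

-- B replaces A's two-phase count-then-redistribute scheme with a single accumulation pass
-- (initialise a year's month template on first sight, increment the zero-filled month key directly, sort once at the end); objective: simpler.


-- t.split('-'): exact for the non-empty separator "-" (PySem.Str.split? is some for sep ≠ "")
def pvSplit (t : String) : List String := (PySem.Str.split? t "-").getD []

-- ===== PORT A =====
-- inner_dict = {str(i).zfill(2): 0 for i in range(1, 13)} built by A's loop
def pvInnerDictA : PySem.Dict String Int :=
  (PySem.List.pyRange 1 13 1).foldl
    (fun d i => d.insert (PySem.Str.zfill (PySem.Int.toStr i) 2) 0) PySem.Dict.empty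

-- body of A's first loop: fill year_dict with the shared inner_dict and count t in tf_dict
def pvStepA1 (st : PySem.Dict String (PySem.Dict String Int) × PySem.Dict String Int) (t : String) :
    PySem.Dict String (PySem.Dict String Int) × PySem.Dict String Int :=
  match pvSplit t with
  | [year_s, _mon_s] =>
      (st.1.insert year_s pvInnerDictA,
       if st.2.contains t then st.2.insert t (st.2.getD t 0 + 1) else st.2.insert t 1)
  | _ => st  -- Python raises ValueError on the unpacking here; Pre_ excludes these inputs

-- body of A's second loop: add_dict = {mon.zfill(2): tf}; a = dict(year_dict.get(year)); a.update(add_dict); year_dict[year] = a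
def pvStepA2 (yd : PySem.Dict String (PySem.Dict String Int)) (p : String × Int) :
    PySem.Dict String (PySem.Dict String Int) :=
  match pvSplit p.1 with
  | [tf_year, tf_mon] =>
      let add_dict : PySem.Dict String Int := PySem.Dict.empty.insert (PySem.Str.zfill tf_mon 2) p.2
      let a := yd.getD tf_year PySem.Dict.empty  -- year_dict.get(tf_year); always present under Pre_
      yd.insert tf_year (a.update add_dict.items)
  | _ => yd  -- unreachable under Pre_ (tf_dict keys come from tt_list)

def time_ddict (tt_list : List String) : List (String × List (String × Int)) :=
  let st := tt_list.foldl pvStepA1 (PySem.Dict.empty, PySem.Dict.empty)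
  let year_dict := PySem.Dict.ofList (PySem.List.sorted st.1.items (fun item => item.1))
  let final := st.2.items.foldl pvStepA2 year_dict
  final.items.map (fun p => (p.1, p.2.items))

-- ===== PORT B =====
-- {str(i).zfill(2): 0 for i in range(1, 13)}
def pvMonTemplateB : PySem.Dict String Int :=
  (PySem.List.pyRange 1 13 1).foldl
    (fun d i => d.insert (PySem.Str.zfill (PySem.Int.toStr i) 2) 0) PySem.Dict.empty

-- body of B's single loop
def pvStepB (res : PySem.Dict String (PySem.Dict String Int)) (t : String) :
    PySem.Dict String (PySem.Dict String Int) :=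
  match pvSplit t with
  | [year, mon] =>
      let res' := if res.contains year then res else res.insert year pvMonTemplateB
      let key := PySem.Str.zfill mon 2
      let inner := res'.getD year PySem.Dict.empty
      res'.insert year (inner.insert key (inner.getD key 0 + 1))
  | _ => res  -- Python raises ValueError on the unpacking here; Pre_ excludes these inputs

def time_ddict_alt (tt_list : List String) : List (String × List (String × Int)) :=
  let res := tt_list.foldl pvStepB PySem.Dict.empty
  (PySem.Dict.ofList (PySem.List.sorted res.items (fun p => p.1))).items.map
    (fun p => (p.1, p.2.items))

-- ===== PRECONDITION & SPEC =====
-- Pre_ excludes (a) inputs where some element does not split on '-' into exactly two pieces (A raises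
-- ValueError there), and (b) lists with two distinct raw strings of the same year whose months zero-fill
-- to the same key, on which A's value (the count of whichever raw variant was counted last) is an
-- accident of its tf-dict iteration while B sums the occurrences.
def Pre_time_ddict (tt_list : List String) : Prop :=
  (∀ t ∈ tt_list, (pvSplit t).length = 2) ∧
  (∀ t ∈ tt_list, ∀ u ∈ tt_list, t ≠ u →
    (pvSplit t).getD 0 "" = (pvSplit u).getD 0 "" →
    PySem.Str.zfill ((pvSplit t).getD 1 "") 2 ≠ PySem.Str.zfill ((pvSplit u).getD 1 "") 2)
instance (tt_list : List String) : Decidable (Pre_time_ddict tt_list) := by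
  unfold Pre_time_ddict; infer_instance

def pvWitness_time_ddict : List String := ["2020-01", "2020-3", "1999-12", "2020-01"]

def Spec_time_ddict (tt_list : List String) (out : List (String × List (String × Int))) : Prop := out = time_ddict_alt tt_list
instance (tt_list : List String) (out : List (String × List (String × Int))) : Decidable (Spec_time_ddict tt_list out) := by unfold Spec_time_ddict; infer_instance

-- ===== CLAIM (what is proved, stated in full; the proofs are below) =====
def Claim_equal_time_ddict : Prop := ∀ (tt_list : List String), Dom_time_ddict tt_list → Pre_time_ddict tt_list → Spec_time_ddict tt_list (time_ddict tt_list)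

-- ===== LEMMAS AND PROOFS =====

-- year and zero-filled month of one element
def pvYr (t : String) : String := (pvSplit t).getD 0 ""
def pvMn (t : String) : String := PySem.Str.zfill ((pvSplit t).getD 1 "") 2

-- proof-side names for the two components of A's first loop
def pvFA (d : PySem.Dict String (PySem.Dict String Int)) (t : String) :
    PySem.Dict String (PySem.Dict String Int) :=
  match pvSplit t with
  | [year_s, _mon_s] => d.insert year_s pvInnerDictA
  | _ => d

def pvFT (d : PySem.Dict String Int) (t : String) : PySem.Dict String Int :=
  match pvSplit t with
  | [_, _] => if d.contains t then d.insert t (d.getD t 0 + 1) else d.insert t 1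
  | _ => d

-- B's per-month increment
def pvIncB (d : PySem.Dict String Int) (t : String) : PySem.Dict String Int :=
  d.insert (pvMn t) (d.getD (pvMn t) 0 + 1)

theorem pvTemplates_eq : pvInnerDictA = pvMonTemplateB := rfl

theorem pvTemplate_lit : pvMonTemplateB = PySem.Dict.mk
    [("01",0),("02",0),("03",0),("04",0),("05",0),("06",0),
     ("07",0),("08",0),("09",0),("10",0),("11",0),("12",0)] := by decide

theorem pvGetD_zero_of_all (k : String) :
    ∀ (l : List (String × Int)), (∀ p ∈ l, p.2 = 0) → (PySem.Dict.mk l).getD k 0 = 0 := by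
  intro l
  induction l with
  | nil => intro _; rfl
  | cons p ps ih =>
      intro h
      rw [PySem.Dict.getD_eq_get?_getD, PySem.Dict.get?_mk_cons]
      by_cases hb : (p.1 == k) = true
      · simpa [hb] using h p (by simp)
      · have := ih (fun q hq => h q (by simp [hq]))
        rw [PySem.Dict.getD_eq_get?_getD] at this
        simpa [hb] using this

theorem pvTemplate_getD_zero (k : String) : pvMonTemplateB.getD k 0 = 0 := by
  rw [pvTemplate_lit]
  apply pvGetD_zero_of_all
  decide

theorem pvTemplate_keys_nodup : pvMonTemplateB.keys.Nodup := by decide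

theorem pvSplit_eq_of_len2 {t : String} (h : (pvSplit t).length = 2) :
    pvSplit t = [pvYr t, (pvSplit t).getD 1 ""] := by
  obtain ⟨a, b, hab⟩ := List.length_eq_two.mp h
  simp [pvYr, hab]

theorem pvStepA1_eq (st : PySem.Dict String (PySem.Dict String Int) × PySem.Dict String Int)
    (t : String) : pvStepA1 st t = (pvFA st.1 t, pvFT st.2 t) := by
  rcases h : pvSplit t with _ | ⟨a, _ | ⟨b, _ | _⟩⟩ <;> simp [pvStepA1, pvFA, pvFT, h]

theorem pvFoldl_pair {α β γ : Type} (f : β → α → β) (g : γ → α → γ) :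
    ∀ (l : List α) (a : β) (b : γ),
      l.foldl (fun st x => (f st.1 x, g st.2 x)) (a, b) = (l.foldl f a, l.foldl g b) := by
  intro l
  induction l with
  | nil => intro a b; rfl
  | cons x xs ih => intro a b; simp [List.foldl_cons, ih]

theorem pvFA_eq {t : String} (h : (pvSplit t).length = 2)
    (d : PySem.Dict String (PySem.Dict String Int)) :
    pvFA d t = d.insert (pvYr t) pvInnerDictA := by
  unfold pvFA; rw [pvSplit_eq_of_len2 h]

theorem pvFT_eq {t : String} (h : (pvSplit t).length = 2) (d : PySem.Dict String Int) :
    pvFT d t = d.insert t (d.getD t 0 + 1) := by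
  unfold pvFT; rw [pvSplit_eq_of_len2 h]
  by_cases hc : d.contains t = true
  · simp [hc]
  · have h0 : d.getD t 0 = 0 := PySem.Dict.getD_of_not_contains d 0 (by simpa using hc)
    simp [hc, h0]

-- the const-value insert loop: lookup
theorem pvGet?_foldl_insert_const {ν : Type} (c : ν) (key : String → String) :
    ∀ (l : List String) (d : PySem.Dict String ν) (y : String),
      (l.foldl (fun d t => d.insert (key t) c) d).get? y
        = if y ∈ l.map key then some c else d.get? y := by
  intro l
  induction l with
  | nil => intro d y; simp
  | cons x xs ih =>
      intro d y
      by_cases hy : y = key x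
      · subst hy
        by_cases hmem : key x ∈ xs.map key <;>
          simp [List.foldl_cons, ih, hmem]
      · simp [List.foldl_cons, ih, PySem.Dict.get?_insert, hy]

-- the grouped insert-update loop: lookup (both phases of both programs have this shape)
theorem pvGrouped_getD {α ν : Type} (key : α → String) (f : ν → α → ν) (dflt : ν) :
    ∀ (l : List α) (d : PySem.Dict String ν) (y : String),
      ((l.foldl (fun d p => d.insert (key p) (f ((d.get? (key p)).getD dflt) p)) d).get? y).getD dflt
        = (l.filter (fun p => key p == y)).foldl f ((d.get? y).getD dflt) := by
  intro l
  induction l with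
  | nil => intro d y; simp
  | cons p ps ih =>
      intro d y
      by_cases hy : key p = y
      · subst hy
        simp [List.foldl_cons, ih]
      · have : (key p == y) = false := by simpa using hy
        simp [List.foldl_cons, ih, PySem.Dict.get?_insert, this, Ne.symm hy]

-- sorting a list of pairs with distinct first components produced from a set of keys
theorem pvSorted_pairs {ν : Type} (v : String → ν) (xs : List String) :
    PySem.List.sorted ((PySem.Set.ofList xs).map (fun y => (y, v y))) (fun p => p.1)
      = (PySem.List.sorted (PySem.Set.ofList xs) (fun y => y)).map (fun y => (y, v y)) := by
  apply PySem.List.sorted_eq_of_perm_of_pairwise_lt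
  · exact (PySem.List.sorted_perm (PySem.Set.ofList xs) (fun y => y) false).map _
  · have := PySem.List.sorted_ofList_pairwise_lt (κ := String) xs
    exact (List.pairwise_map).mpr this

theorem pvOfList_items {ν : Type} (ps : List (String × ν)) (h : (ps.map (fun p => p.1)).Nodup) :
    (PySem.Dict.ofList ps).items = ps := by
  have := PySem.Dict.items_foldl_insert_fresh ps (fun p => p.1) (fun p => p.2)
      (PySem.Dict.empty (κ := String) (ν := ν)) (by intro a _; simp) h
  simpa using this

-- Set.update with nothing new is the identity
theorem pvUpdate_no_new (s : PySem.Set String) (xs : List String)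
    (h : ∀ x ∈ xs, x ∈ s) : PySem.Set.update s xs = s := by
  rw [PySem.Set.update_eq_append_filter]
  have : (PySem.Set.ofList xs).filter (fun y => !PySem.Set.contains s y) = [] := by
    apply List.filter_eq_nil_iff.mpr
    intro a ha
    have hm : a ∈ s := h a ((PySem.Set.mem_ofList _ _).mp ha)
    simpa using hm
  rw [this, List.append_nil]

-- Set.update only sees the distinct elements
theorem pvUpdate_ofList (s : PySem.Set String) (xs : List String) :
    PySem.Set.update s (PySem.Set.ofList xs) = PySem.Set.update s xs := by
  rw [PySem.Set.update_eq_append_filter, PySem.Set.update_eq_append_filter,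
      PySem.Set.ofList_ofList]

-- B's loop body, in grouped form
theorem pvStepB_eq {t : String} (h : (pvSplit t).length = 2)
    (res : PySem.Dict String (PySem.Dict String Int)) :
    pvStepB res t
      = res.insert (pvYr t) (pvIncB ((res.get? (pvYr t)).getD pvMonTemplateB) t) := by
  have hs := pvSplit_eq_of_len2 h
  unfold pvStepB
  rw [hs]
  by_cases hc : res.contains (pvYr t) = true
  · have hv : ∃ v, res.get? (pvYr t) = some v := by
      rw [PySem.Dict.contains_eq_isSome_get?] at hc
      exact Option.isSome_iff_exists.mp hc
    obtain ⟨v, hv⟩ := hv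
    simp only [hc, if_true, pvIncB, pvMn, PySem.Dict.getD_eq_get?_getD, hv, Option.getD_some]
  · have hg : res.get? (pvYr t) = none := by
      rw [PySem.Dict.contains_eq_isSome_get?] at hc
      simpa using hc
    simp [hc, pvIncB, pvMn, PySem.Dict.getD_eq_get?_getD, hg,
      PySem.Dict.get?_insert_self, PySem.Dict.insert_insert_self]

-- A's second loop body, in grouped form
theorem pvStepA2_eq {t : String} (h : (pvSplit t).length = 2) (c : Int)
    (yd : PySem.Dict String (PySem.Dict String Int)) :
    pvStepA2 yd (t, c)
      = yd.insert (pvYr t)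
          ((((yd.get? (pvYr t)).getD PySem.Dict.empty)).insert (pvMn t) c) := by
  have hs := pvSplit_eq_of_len2 h
  unfold pvStepA2
  rw [show ((t, c) : String × Int).1 = t from rfl, hs]
  simp [pvMn, PySem.Dict.getD_eq_get?_getD, PySem.Dict.update,
    PySem.Dict.items_insert_of_not_contains,
    show (PySem.Dict.empty : PySem.Dict String Int).items = [] from rfl]

-- counting in an image list
theorem pvCount_map {α κ : Type} [BEq κ] [LawfulBEq κ] (f : α → κ) (b : α) :
    ∀ (l : List α), (l.map f).count (f b) = l.countP (fun a => f a == f b) := by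
  intro l
  induction l with
  | nil => rfl
  | cons x xs ih => simp [List.count_cons, List.countP_cons, ih]

-- dedup commutes with filter
theorem pvOfList_filter (p : String → Bool) :
    ∀ (l : List String), (PySem.Set.ofList l).filter p = PySem.Set.ofList (l.filter p) := by
  intro l
  induction l using List.reverseRecOn with
  | nil => rfl
  | append_singleton xs x ih =>
      rw [PySem.Set.ofList_append_singleton, List.filter_append]
      by_cases hm : x ∈ xs
      · rw [PySem.Set.add_of_mem (by simpa [PySem.Set.mem_ofList] using hm), ih]
        by_cases hp : p x = true
        · rw [show List.filter p [x] = [x] by simp [hp], PySem.Set.ofList_append_singleton,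
            PySem.Set.add_of_mem (by simp [PySem.Set.mem_ofList, List.mem_filter, hm, hp])]
        · simp [List.filter, hp]
      · rw [PySem.Set.add_of_not_mem (by simpa [PySem.Set.mem_ofList] using hm), List.filter_append]
        by_cases hp : p x = true
        · rw [show List.filter p [x] = [x] by simp [hp], PySem.Set.ofList_append_singleton,
            PySem.Set.add_of_not_mem (by simp [PySem.Set.mem_ofList, List.mem_filter, hm]), ih]
        · simp [List.filter, hp, ih]

-- dedup commutes with an injective map
theorem pvMap_ofList (f : String → String) :
    ∀ (l : List String), (∀ t ∈ l, ∀ u ∈ l, f t = f u → t = u) →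
      (PySem.Set.ofList l).map f = PySem.Set.ofList (l.map f) := by
  intro l
  induction l using List.reverseRecOn with
  | nil => intro _; rfl
  | append_singleton xs x ih =>
      intro hinj
      have hinj' : ∀ t ∈ xs, ∀ u ∈ xs, f t = f u → t = u := by
        intro t ht u hu
        exact hinj t (by simp [ht]) u (by simp [hu])
      rw [PySem.Set.ofList_append_singleton, List.map_append, List.map_singleton,
        PySem.Set.ofList_append_singleton]
      by_cases hm : x ∈ xs
      · rw [PySem.Set.add_of_mem (by simpa [PySem.Set.mem_ofList] using hm), ih hinj',
          PySem.Set.add_of_mem (by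
            simp only [PySem.Set.mem_ofList, List.mem_map]
            exact ⟨x, hm, rfl⟩)]
      · rw [PySem.Set.add_of_not_mem (by simpa [PySem.Set.mem_ofList] using hm),
          List.map_append, List.map_singleton, ih hinj',
          PySem.Set.add_of_not_mem (by
            simp only [PySem.Set.mem_ofList, List.mem_map]
            rintro ⟨u, hu, he⟩
            exact hm (hinj u (by simp [hu]) x (by simp) he ▸ hu))]

-- lookups after a fold of inserts with pairwise-distinct keys
theorem pvGetD_foldl_distinct_not_mem {α : Type} (key : α → String) (vals : α → Int) :
    ∀ (l : List α) (d : PySem.Dict String Int) (k : String), k ∉ l.map key →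
      (l.foldl (fun d t => d.insert (key t) (vals t)) d).getD k 0 = d.getD k 0 := by
  intro l
  induction l with
  | nil => intro d k _; rfl
  | cons x xs ih =>
      intro d k hk
      rw [List.map_cons] at hk
      simp only [List.mem_cons, not_or] at hk
      rw [List.foldl_cons, ih _ _ hk.2, PySem.Dict.getD_insert, if_neg hk.1]

theorem pvGetD_foldl_distinct_mem {α : Type} (key : α → String) (vals : α → Int) :
    ∀ (l : List α) (d : PySem.Dict String Int), (l.map key).Nodup →
      ∀ t0 ∈ l, (l.foldl (fun d t => d.insert (key t) (vals t)) d).getD (key t0) 0 = vals t0 := by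
  intro l
  induction l with
  | nil => intro d _ t0 h0; simp at h0
  | cons x xs ih =>
      intro d hnd t0 h0
      rw [List.map_cons, List.nodup_cons] at hnd
      rw [List.mem_cons] at h0
      rcases h0 with h0 | h0
      · subst h0
        rw [List.foldl_cons, pvGetD_foldl_distinct_not_mem key vals xs _ _ hnd.1,
          PySem.Dict.getD_insert]
        simp
      · exact ih (d.insert (key x) (vals x)) hnd.2 t0 h0

-- the per-year core: counting one by one equals writing the total count per distinct element,
-- provided distinct elements have distinct month keys
theorem pvCore (g : List String)
    (hinj : ∀ t ∈ g, ∀ u ∈ g, pvMn t = pvMn u → t = u) :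
    g.foldl pvIncB pvMonTemplateB
      = (PySem.Set.ofList g).foldl
          (fun d t => d.insert (pvMn t) ((g.count t : Int))) pvMonTemplateB := by
  have hofinj : ∀ t ∈ PySem.Set.ofList g, ∀ u ∈ PySem.Set.ofList g, pvMn t = pvMn u → t = u := by
    intro t ht u hu
    exact hinj t ((PySem.Set.mem_ofList _ _).mp ht) u ((PySem.Set.mem_ofList _ _).mp hu)
  have hmnd : ((PySem.Set.ofList g).map pvMn).Nodup :=
    List.Nodup.map_on hofinj (PySem.Set.nodup_ofList g)
  have hmap : (PySem.Set.ofList g).map pvMn = PySem.Set.ofList (g.map pvMn) :=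
    pvMap_ofList pvMn g hinj
  -- the left side is a plain counting loop over the month keys
  have hL : g.foldl pvIncB pvMonTemplateB
      = (g.map pvMn).foldl (fun d x => d.insert x (d.getD x 0 + 1)) pvMonTemplateB := by
    rw [List.foldl_map]
    rfl
  -- keys of the two sides agree
  have hkL : (g.foldl pvIncB pvMonTemplateB).keys
      = PySem.Set.update pvMonTemplateB.keys (g.map pvMn) := by
    rw [hL]
    exact PySem.Dict.keys_foldl_insert _ _ _
  have hkR : ((PySem.Set.ofList g).foldl
        (fun d t => d.insert (pvMn t) ((g.count t : Int))) pvMonTemplateB).keys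
      = PySem.Set.update pvMonTemplateB.keys (g.map pvMn) := by
    rw [PySem.Dict.keys_foldl_insert_key, hmap, pvUpdate_ofList]
  have hndL : (g.foldl pvIncB pvMonTemplateB).keys.Nodup := by
    rw [hL]
    exact PySem.Dict.nodup_keys_foldl_insert _ _ _ pvTemplate_keys_nodup
  have hndR : ((PySem.Set.ofList g).foldl
        (fun d t => d.insert (pvMn t) ((g.count t : Int))) pvMonTemplateB).keys.Nodup :=
    PySem.Dict.nodup_keys_foldl_insert_key _ _ _ _ pvTemplate_keys_nodup
  -- pointwise values agree
  have hval : ∀ k, (g.foldl pvIncB pvMonTemplateB).getD k 0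
      = ((PySem.Set.ofList g).foldl
          (fun d t => d.insert (pvMn t) ((g.count t : Int))) pvMonTemplateB).getD k 0 := by
    intro k
    have hLv : (g.foldl pvIncB pvMonTemplateB).getD k 0 = ((g.map pvMn).count k : Int) := by
      rw [hL, PySem.Dict.getD_foldl_insert_add_one, pvTemplate_getD_zero, zero_add]
    by_cases hk : k ∈ (PySem.Set.ofList g).map pvMn
    · obtain ⟨t0, ht0, rfl⟩ := List.mem_map.mp hk
      have ht0g : t0 ∈ g := (PySem.Set.mem_ofList _ _).mp ht0
      have hRv := pvGetD_foldl_distinct_mem pvMn (fun t => (g.count t : Int))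
        (PySem.Set.ofList g) pvMonTemplateB hmnd t0 ht0
      rw [hRv, hLv, pvCount_map]
      have : g.countP (fun a => pvMn a == pvMn t0) = g.countP (fun a => a == t0) := by
        apply List.countP_congr
        intro x hx
        constructor
        · intro hb
          exact beq_iff_eq.mpr (hinj x hx t0 ht0g (beq_iff_eq.mp hb))
        · intro hb
          rw [beq_iff_eq.mp hb]
          simp
      rw [this]
      rfl
    · have hknot : k ∉ g.map pvMn := by
        intro hmem
        apply hk
        rw [hmap]
        exact (PySem.Set.mem_ofList _ _).mpr hmem
      rw [hLv, pvGetD_foldl_distinct_not_mem _ _ _ _ _ hk, pvTemplate_getD_zero,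
        List.count_eq_zero.mpr hknot]
      rfl
  -- both dicts have the same items
  apply PySem.Dict.ext
  rw [PySem.Dict.items_eq_map_keys _ hndL 0, PySem.Dict.items_eq_map_keys _ hndR 0,
    hkL, hkR]
  apply List.map_congr_left
  intro a _
  rw [hval a]

-- A's second phase, written over the distinct elements of tt_list
def pvAVal (tt_list : List String) (y : String) : PySem.Dict String Int :=
  ((PySem.Set.ofList tt_list).filter (fun t => pvYr t == y)).foldl
    (fun a t => a.insert (pvMn t) ((tt_list.count t : Int))) pvInnerDictA

-- B's per-year accumulated dict
def pvBVal (tt_list : List String) (y : String) : PySem.Dict String Int :=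
  (tt_list.filter (fun t => pvYr t == y)).foldl pvIncB pvMonTemplateB

theorem pvAVal_eq_pvBVal (tt_list : List String)
    (hinj2 : ∀ t ∈ tt_list, ∀ u ∈ tt_list, t ≠ u →
      (pvSplit t).getD 0 "" = (pvSplit u).getD 0 "" →
      PySem.Str.zfill ((pvSplit t).getD 1 "") 2 ≠ PySem.Str.zfill ((pvSplit u).getD 1 "") 2)
    (y : String) : pvAVal tt_list y = pvBVal tt_list y := by
  have hg : ∀ t ∈ tt_list.filter (fun t => pvYr t == y),
      ∀ u ∈ tt_list.filter (fun t => pvYr t == y), pvMn t = pvMn u → t = u := by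
    intro t ht u hu hmn
    rw [List.mem_filter] at ht hu
    by_contra hne
    exact hinj2 t ht.1 u hu.1 hne
      ((beq_iff_eq.mp ht.2).trans (beq_iff_eq.mp hu.2).symm) hmn
  unfold pvAVal pvBVal
  rw [pvOfList_filter, pvTemplates_eq, pvCore (tt_list.filter (fun t => pvYr t == y)) hg]
  apply PySem.List.foldl_congr_mem
  intro acc t ht
  have htf : t ∈ tt_list.filter (fun t => pvYr t == y) := (PySem.Set.mem_ofList _ _).mp ht
  rw [List.count_filter]
  exact (List.mem_filter.mp htf).2

-- ===== VERDICT (by name: the statement is the Claim_ definition above) =====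
theorem time_ddict_spec : Claim_equal_time_ddict := by
  unfold Claim_equal_time_ddict Spec_time_ddict
  intro tt_list _hdom hpre
  obtain ⟨h2, hinj2⟩ := hpre
  -- shared names
  have hKs_nd : (PySem.Set.ofList (tt_list.map pvYr)).Nodup := PySem.Set.nodup_ofList _
  have hYs_perm : (PySem.List.sorted (PySem.Set.ofList (tt_list.map pvYr)) (fun y => y)).Perm
      (PySem.Set.ofList (tt_list.map pvYr)) := PySem.List.sorted_perm _ _ false
  have hYs_nd : (PySem.List.sorted (PySem.Set.ofList (tt_list.map pvYr)) (fun y => y)).Nodup :=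
    hYs_perm.nodup_iff.mpr hKs_nd
  have hmemYs : ∀ t ∈ tt_list,
      pvYr t ∈ PySem.List.sorted (PySem.Set.ofList (tt_list.map pvYr)) (fun y => y) := by
    intro t ht
    rw [PySem.List.mem_sorted]
    exact (PySem.Set.mem_ofList _ _).mpr (List.mem_map_of_mem ht)
  -- ===== the A side =====
  have hA1 : tt_list.foldl pvStepA1 (PySem.Dict.empty, PySem.Dict.empty)
      = (tt_list.foldl (fun d t => d.insert (pvYr t) pvInnerDictA) PySem.Dict.empty,
         PySem.Dict.counter tt_list) := by
    rw [PySem.List.foldl_congr_mem tt_list pvStepA1 (fun st x => (pvFA st.1 x, pvFT st.2 x)) _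
        (fun acc x _ => pvStepA1_eq acc x),
      pvFoldl_pair]
    rw [PySem.List.foldl_congr_mem tt_list pvFA _ _ (fun acc t ht => pvFA_eq (h2 t ht) acc),
      PySem.List.foldl_congr_mem tt_list pvFT _ _ (fun acc t ht => pvFT_eq (h2 t ht) acc),
      PySem.Dict.foldl_insert_getD_add_one_eq_counter]
  have hydA_get : ∀ y, (tt_list.foldl (fun d t => d.insert (pvYr t) pvInnerDictA)
        PySem.Dict.empty).get? y
      = if y ∈ tt_list.map pvYr then some pvInnerDictA else none := by
    intro y
    rw [pvGet?_foldl_insert_const pvInnerDictA pvYr tt_list PySem.Dict.empty y]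
    simp [PySem.Dict.get?_empty]
  have hydA_keys : (tt_list.foldl (fun d t => d.insert (pvYr t) pvInnerDictA)
        PySem.Dict.empty).keys = PySem.Set.ofList (tt_list.map pvYr) := by
    rw [PySem.Dict.keys_foldl_insert_key tt_list pvYr (fun _ _ => pvInnerDictA)]
    simp [PySem.Dict.keys_empty, PySem.Set.update_nil_left]
  have hydA_items : (tt_list.foldl (fun d t => d.insert (pvYr t) pvInnerDictA)
        PySem.Dict.empty).items
      = (PySem.Set.ofList (tt_list.map pvYr)).map (fun y => (y, pvInnerDictA)) := by
    rw [PySem.Dict.items_eq_map_keys _ (by rw [hydA_keys]; exact hKs_nd) PySem.Dict.empty,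
      hydA_keys]
    apply List.map_congr_left
    intro y hy
    rw [PySem.Dict.getD_eq_get?_getD, hydA_get,
      if_pos ((PySem.Set.mem_ofList _ _).mp hy), Option.getD_some]
  have hsortedA : PySem.List.sorted (tt_list.foldl
        (fun d t => d.insert (pvYr t) pvInnerDictA) PySem.Dict.empty).items
        (fun item => item.1)
      = (PySem.List.sorted (PySem.Set.ofList (tt_list.map pvYr)) (fun y => y)).map
          (fun y => (y, pvInnerDictA)) := by
    rw [hydA_items]
    exact pvSorted_pairs _ _
  have hyd2_items : (PySem.Dict.ofList
        ((PySem.List.sorted (PySem.Set.ofList (tt_list.map pvYr)) (fun y => y)).map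
          (fun y => (y, pvInnerDictA)))).items
      = (PySem.List.sorted (PySem.Set.ofList (tt_list.map pvYr)) (fun y => y)).map
          (fun y => (y, pvInnerDictA)) := by
    apply pvOfList_items
    rw [List.map_map, show ((fun p : String × PySem.Dict String Int => p.1) ∘
      fun y : String => (y, pvInnerDictA)) = (fun y => y) from rfl]
    simpa using hYs_nd
  have hyd2_keys : (PySem.Dict.ofList
        ((PySem.List.sorted (PySem.Set.ofList (tt_list.map pvYr)) (fun y => y)).map
          (fun y => (y, pvInnerDictA)))).keys
      = PySem.List.sorted (PySem.Set.ofList (tt_list.map pvYr)) (fun y => y) := by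
    simp only [PySem.Dict.keys, hyd2_items]
    rw [List.map_map, show ((fun p : String × PySem.Dict String Int => p.1) ∘
      fun y : String => (y, pvInnerDictA)) = (fun y => y) from rfl]
    simp
  have hyd2_get : ∀ y ∈ PySem.List.sorted (PySem.Set.ofList (tt_list.map pvYr)) (fun y => y),
      (PySem.Dict.ofList
        ((PySem.List.sorted (PySem.Set.ofList (tt_list.map pvYr)) (fun y => y)).map
          (fun y => (y, pvInnerDictA)))).get? y = some pvInnerDictA := by
    intro y hy
    apply PySem.Dict.get?_of_mem_items
    · rw [hyd2_items]
      exact List.mem_map.mpr ⟨y, hy, rfl⟩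
    · rw [hyd2_keys]
      exact hYs_nd
  -- phase 2 of A
  have hA2 : ((PySem.Dict.counter tt_list).items.foldl pvStepA2
        (PySem.Dict.ofList
          ((PySem.List.sorted (PySem.Set.ofList (tt_list.map pvYr)) (fun y => y)).map
            (fun y => (y, pvInnerDictA)))))
      = (PySem.Set.ofList tt_list).foldl
          (fun yd t => yd.insert (pvYr t)
            (((yd.get? (pvYr t)).getD PySem.Dict.empty).insert (pvMn t)
              ((tt_list.count t : Int))))
          (PySem.Dict.ofList
            ((PySem.List.sorted (PySem.Set.ofList (tt_list.map pvYr)) (fun y => y)).map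
              (fun y => (y, pvInnerDictA)))) := by
    rw [PySem.Dict.items_counter, List.foldl_map]
    apply PySem.List.foldl_congr_mem
    intro acc t ht
    exact pvStepA2_eq (h2 t ((PySem.Set.mem_ofList _ _).mp ht)) _ acc
  -- keys, lookups and items of A's final dict
  have hF_keys : ((PySem.Set.ofList tt_list).foldl
        (fun yd t => yd.insert (pvYr t)
          (((yd.get? (pvYr t)).getD PySem.Dict.empty).insert (pvMn t)
            ((tt_list.count t : Int))))
        (PySem.Dict.ofList
          ((PySem.List.sorted (PySem.Set.ofList (tt_list.map pvYr)) (fun y => y)).map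
            (fun y => (y, pvInnerDictA))))).keys
      = PySem.List.sorted (PySem.Set.ofList (tt_list.map pvYr)) (fun y => y) := by
    rw [PySem.Dict.keys_foldl_insert_key, hyd2_keys]
    apply pvUpdate_no_new
    intro x hx
    obtain ⟨t, ht, rfl⟩ := List.mem_map.mp hx
    exact hmemYs t ((PySem.Set.mem_ofList _ _).mp ht)
  have hF_getD : ∀ y ∈ PySem.List.sorted (PySem.Set.ofList (tt_list.map pvYr)) (fun y => y),
      (((PySem.Set.ofList tt_list).foldl
        (fun yd t => yd.insert (pvYr t)
          (((yd.get? (pvYr t)).getD PySem.Dict.empty).insert (pvMn t)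
            ((tt_list.count t : Int))))
        (PySem.Dict.ofList
          ((PySem.List.sorted (PySem.Set.ofList (tt_list.map pvYr)) (fun y => y)).map
            (fun y => (y, pvInnerDictA))))).get? y).getD PySem.Dict.empty
      = pvAVal tt_list y := by
    intro y hy
    rw [pvGrouped_getD pvYr
      (fun a t => a.insert (pvMn t) ((tt_list.count t : Int))) PySem.Dict.empty
      (PySem.Set.ofList tt_list) _ y, hyd2_get y hy]
    simp only [Option.getD_some, pvAVal]
  have hF_items : ((PySem.Set.ofList tt_list).foldl
        (fun yd t => yd.insert (pvYr t)
          (((yd.get? (pvYr t)).getD PySem.Dict.empty).insert (pvMn t)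
            ((tt_list.count t : Int))))
        (PySem.Dict.ofList
          ((PySem.List.sorted (PySem.Set.ofList (tt_list.map pvYr)) (fun y => y)).map
            (fun y => (y, pvInnerDictA))))).items
      = (PySem.List.sorted (PySem.Set.ofList (tt_list.map pvYr)) (fun y => y)).map
          (fun y => (y, pvAVal tt_list y)) := by
    rw [PySem.Dict.items_eq_map_keys _ (by rw [hF_keys]; exact hYs_nd) PySem.Dict.empty,
      hF_keys]
    apply List.map_congr_left
    intro y hy
    rw [PySem.Dict.getD_eq_get?_getD, hF_getD y hy]
  -- ===== the B side =====
  have hB1 : tt_list.foldl pvStepB PySem.Dict.empty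
      = tt_list.foldl (fun res t =>
          res.insert (pvYr t) (pvIncB ((res.get? (pvYr t)).getD pvMonTemplateB) t))
          PySem.Dict.empty :=
    PySem.List.foldl_congr_mem _ _ _ _ (fun acc t ht => pvStepB_eq (h2 t ht) acc)
  have hB_keys : (tt_list.foldl (fun res t =>
          res.insert (pvYr t) (pvIncB ((res.get? (pvYr t)).getD pvMonTemplateB) t))
          PySem.Dict.empty).keys = PySem.Set.ofList (tt_list.map pvYr) := by
    rw [PySem.Dict.keys_foldl_insert_key tt_list pvYr
      (fun res t => pvIncB ((res.get? (pvYr t)).getD pvMonTemplateB) t)]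
    simp [PySem.Dict.keys_empty, PySem.Set.update_nil_left]
  have hB_getD : ∀ y, ((tt_list.foldl (fun res t =>
          res.insert (pvYr t) (pvIncB ((res.get? (pvYr t)).getD pvMonTemplateB) t))
          PySem.Dict.empty).get? y).getD pvMonTemplateB = pvBVal tt_list y := by
    intro y
    have := pvGrouped_getD pvYr
      (fun a t => pvIncB a t) pvMonTemplateB tt_list PySem.Dict.empty y
    simp only [PySem.Dict.get?_empty, Option.getD_none] at this
    rw [this]
    rfl
  have hB_items : (tt_list.foldl (fun res t =>
          res.insert (pvYr t) (pvIncB ((res.get? (pvYr t)).getD pvMonTemplateB) t))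
          PySem.Dict.empty).items
      = (PySem.Set.ofList (tt_list.map pvYr)).map (fun y => (y, pvBVal tt_list y)) := by
    rw [PySem.Dict.items_eq_map_keys _ (by rw [hB_keys]; exact hKs_nd) pvMonTemplateB,
      hB_keys]
    apply List.map_congr_left
    intro y _
    rw [PySem.Dict.getD_eq_get?_getD, hB_getD y]
  have hsortedB : PySem.List.sorted (tt_list.foldl (fun res t =>
          res.insert (pvYr t) (pvIncB ((res.get? (pvYr t)).getD pvMonTemplateB) t))
          PySem.Dict.empty).items (fun p => p.1)
      = (PySem.List.sorted (PySem.Set.ofList (tt_list.map pvYr)) (fun y => y)).map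
          (fun y => (y, pvBVal tt_list y)) := by
    rw [hB_items]
    exact pvSorted_pairs _ _
  have hBof_items : (PySem.Dict.ofList
        ((PySem.List.sorted (PySem.Set.ofList (tt_list.map pvYr)) (fun y => y)).map
          (fun y => (y, pvBVal tt_list y)))).items
      = (PySem.List.sorted (PySem.Set.ofList (tt_list.map pvYr)) (fun y => y)).map
          (fun y => (y, pvBVal tt_list y)) := by
    apply pvOfList_items
    rw [List.map_map, show ((fun p : String × PySem.Dict String Int => p.1) ∘
      fun y : String => (y, pvBVal tt_list y)) = (fun y => y) from rfl]
    simpa using hYs_nd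
  -- ===== put the two sides together =====
  simp only [time_ddict, time_ddict_alt]
  rw [hA1]
  simp only []
  rw [hsortedA, hA2, hF_items, hB1, hsortedB, hBof_items, List.map_map, List.map_map]
  apply List.map_congr_left
  intro y _
  simp [Function.comp, pvAVal_eq_pvBVal tt_list hinj2 y]
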